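-- pv_equiv track=rewrite | github.com/vipinus/openwrt-2026 | fix-configs.py | get_enabled_set
-- ===== SOURCE A (Python) =====
-- PACKAGES_DISABLE = [
--     "CONFIG_PACKAGE_luci=y",
--     "CONFIG_PACKAGE_luci-ssl=y",
--     "CONFIG_PACKAGE_luci-light=y",
--     "CONFIG_PACKAGE_dnsmasq-full=y",
--     "CONFIG_PACKAGE_luci-app-dnscrypt-proxy=y",
--     "CONFIG_PACKAGE_dnsmasq_full_dhcp=y",
--     "CONFIG_PACKAGE_dnsmasq_full_dnssec=y",
--     "CONFIG_PACKAGE_procd-ujail=y",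
-- ]
--
-- OPTIONS_DISABLE = [
--     "CONFIG_DEFAULT_procd-ujail=y",
--     "CONFIG_AUTOREMOVE=y",
-- ]
--
-- PACKAGES_ENABLE = [
--     "CONFIG_PACKAGE_luci-base=y",
--     "CONFIG_PACKAGE_luci-mod-admin-full=y",
--     "CONFIG_PACKAGE_luci-compat=y",
--     "CONFIG_PACKAGE_uhttpd=y",
--     "CONFIG_PACKAGE_rpcd-mod-luci=y",
--     "CONFIG_PACKAGE_openssl-util=y",
--     "CONFIG_PACKAGE_curl=y",
--     "CONFIG_PACKAGE_ca-bundle=y",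
--     "CONFIG_PACKAGE_iputils-ping=y",
--     "CONFIG_PACKAGE_resolveip=y",
--     "CONFIG_PACKAGE_cron=y",
--     "CONFIG_PACKAGE_kmod-tun=y",
--     "CONFIG_PACKAGE_openconnect=y",
--     "CONFIG_PACKAGE_dnscrypt-proxy2=y",
-- ]
--
-- ADD_IF_MISSING = [
--     "CONFIG_IPV6=y",
--     "CONFIG_NFTABLES_IPV6=y",
-- ]
--
-- def get_enabled_set(lines):
--     enabled = set()
--     for line in lines:
--         stripped = line.strip()
--         if stripped.startswith('#'):
--             for pkg in PACKAGES_ENABLE: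
--                 if stripped == f"# {pkg} is not set":
--                     enabled.add(f"# {pkg} is not set")
--             continue
--         for pkg in PACKAGES_ENABLE:
--             if stripped == pkg:
--                 enabled.add(pkg)
--         for pkg in ADD_IF_MISSING:
--             if stripped == pkg:
--                 enabled.add(pkg)
--         for pkg in PACKAGES_DISABLE + OPTIONS_DISABLE:
--             if stripped == pkg:
--                 enabled.add(pkg)
--     return enabled
-- ===== SOURCE B (Python) =====
-- PACKAGES_DISABLE = [
--     "CONFIG_PACKAGE_luci=y",
--     "CONFIG_PACKAGE_luci-ssl=y",
--     "CONFIG_PACKAGE_luci-light=y",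
--     "CONFIG_PACKAGE_dnsmasq-full=y",
--     "CONFIG_PACKAGE_luci-app-dnscrypt-proxy=y",
--     "CONFIG_PACKAGE_dnsmasq_full_dhcp=y",
--     "CONFIG_PACKAGE_dnsmasq_full_dnssec=y",
--     "CONFIG_PACKAGE_procd-ujail=y",
-- ]
--
-- OPTIONS_DISABLE = [
--     "CONFIG_DEFAULT_procd-ujail=y",
--     "CONFIG_AUTOREMOVE=y",
-- ]
--
-- PACKAGES_ENABLE = [
--     "CONFIG_PACKAGE_luci-base=y",
--     "CONFIG_PACKAGE_luci-mod-admin-full=y",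
--     "CONFIG_PACKAGE_luci-compat=y",
--     "CONFIG_PACKAGE_uhttpd=y",
--     "CONFIG_PACKAGE_rpcd-mod-luci=y",
--     "CONFIG_PACKAGE_openssl-util=y",
--     "CONFIG_PACKAGE_curl=y",
--     "CONFIG_PACKAGE_ca-bundle=y",
--     "CONFIG_PACKAGE_iputils-ping=y",
--     "CONFIG_PACKAGE_resolveip=y",
--     "CONFIG_PACKAGE_cron=y",
--     "CONFIG_PACKAGE_kmod-tun=y",
--     "CONFIG_PACKAGE_openconnect=y",
--     "CONFIG_PACKAGE_dnscrypt-proxy2=y",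
-- ]
--
-- ADD_IF_MISSING = [
--     "CONFIG_IPV6=y",
--     "CONFIG_NFTABLES_IPV6=y",
-- ]
--
-- # One precomputed table of every recognizable line (no plain token starts with
-- # '#', so the comment forms cannot collide with the others).
-- _ALLOWED = (set(PACKAGES_ENABLE) | set(ADD_IF_MISSING)
--             | set(PACKAGES_DISABLE) | set(OPTIONS_DISABLE)
--             | {f"# {pkg} is not set" for pkg in PACKAGES_ENABLE})
--
--
-- def get_enabled_set(lines):
--     return {line.strip() for line in lines} & _ALLOWED
-- ===== Notes on version B (the rewrite author's own statement) =====
-- stated objective: simpler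
-- what changed: Replaces the per-line branch on '#' and the four nested scans over the constant lists with one precomputed allowed set and a single set intersection of the stripped lines with it.
import Mathlib
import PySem

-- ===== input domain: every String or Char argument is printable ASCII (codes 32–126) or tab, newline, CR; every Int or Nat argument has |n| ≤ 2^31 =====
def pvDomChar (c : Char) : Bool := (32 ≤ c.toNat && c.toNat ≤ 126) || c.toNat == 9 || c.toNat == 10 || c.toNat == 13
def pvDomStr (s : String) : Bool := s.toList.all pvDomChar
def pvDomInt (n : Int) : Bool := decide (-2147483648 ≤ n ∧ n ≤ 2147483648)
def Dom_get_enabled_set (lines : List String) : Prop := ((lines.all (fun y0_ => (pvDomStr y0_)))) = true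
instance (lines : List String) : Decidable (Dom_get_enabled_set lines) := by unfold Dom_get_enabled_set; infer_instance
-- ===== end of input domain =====

-- B replaces A's per-line '#'-branch and four nested scans over the constant
-- lists by one precomputed allowed set intersected with the stripped lines (simpler).

-- ===== PORT A =====
def pvPackagesDisable : List String := [
  "CONFIG_PACKAGE_luci=y",
  "CONFIG_PACKAGE_luci-ssl=y",
  "CONFIG_PACKAGE_luci-light=y",
  "CONFIG_PACKAGE_dnsmasq-full=y",
  "CONFIG_PACKAGE_luci-app-dnscrypt-proxy=y",
  "CONFIG_PACKAGE_dnsmasq_full_dhcp=y",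
  "CONFIG_PACKAGE_dnsmasq_full_dnssec=y",
  "CONFIG_PACKAGE_procd-ujail=y"]

def pvOptionsDisable : List String := [
  "CONFIG_DEFAULT_procd-ujail=y",
  "CONFIG_AUTOREMOVE=y"]

def pvPackagesEnable : List String := [
  "CONFIG_PACKAGE_luci-base=y",
  "CONFIG_PACKAGE_luci-mod-admin-full=y",
  "CONFIG_PACKAGE_luci-compat=y",
  "CONFIG_PACKAGE_uhttpd=y",
  "CONFIG_PACKAGE_rpcd-mod-luci=y",
  "CONFIG_PACKAGE_openssl-util=y",
  "CONFIG_PACKAGE_curl=y",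
  "CONFIG_PACKAGE_ca-bundle=y",
  "CONFIG_PACKAGE_iputils-ping=y",
  "CONFIG_PACKAGE_resolveip=y",
  "CONFIG_PACKAGE_cron=y",
  "CONFIG_PACKAGE_kmod-tun=y",
  "CONFIG_PACKAGE_openconnect=y",
  "CONFIG_PACKAGE_dnscrypt-proxy2=y"]

def pvAddIfMissing : List String := [
  "CONFIG_IPV6=y",
  "CONFIG_NFTABLES_IPV6=y"]

-- f"# {pkg} is not set"
def pvNotSet (pkg : String) : String := "# " ++ pkg ++ " is not set"

-- the body of A's 'for line in lines' loop
def pvStepA (enabled : PySem.Set String) (line : String) : PySem.Set String :=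
  let stripped := PySem.Str.strip line
  if PySem.Str.startswith stripped "#" then
    pvPackagesEnable.foldl
      (fun s pkg => if stripped = pvNotSet pkg then PySem.Set.add s (pvNotSet pkg) else s) enabled
  else
    (pvPackagesDisable ++ pvOptionsDisable).foldl
      (fun s pkg => if stripped = pkg then PySem.Set.add s pkg else s)
      (pvAddIfMissing.foldl
        (fun s pkg => if stripped = pkg then PySem.Set.add s pkg else s)
        (pvPackagesEnable.foldl
          (fun s pkg => if stripped = pkg then PySem.Set.add s pkg else s) enabled))

def get_enabled_set (lines : List String) : List String :=
  lines.foldl pvStepA PySem.Set.empty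

-- ===== PORT B =====
-- _ALLOWED = set(ENABLE) | set(ADD_IF_MISSING) | set(DISABLE) | set(OPTIONS) | {f"# {p} is not set" …}
def pvAllowed : PySem.Set String :=
  PySem.Set.union (PySem.Set.union (PySem.Set.union (PySem.Set.union
    (PySem.Set.ofList pvPackagesEnable) (PySem.Set.ofList pvAddIfMissing))
    (PySem.Set.ofList pvPackagesDisable)) (PySem.Set.ofList pvOptionsDisable))
    (PySem.Set.ofList (pvPackagesEnable.map pvNotSet))

def get_enabled_set_alt (lines : List String) : List String :=
  PySem.Set.inter (PySem.Set.ofList (lines.map PySem.Str.strip)) pvAllowed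

-- ===== PRECONDITION & SPEC =====
def Spec_get_enabled_set (lines : List String) (out : List String) : Prop := out = get_enabled_set_alt lines
instance (lines : List String) (out : List String) : Decidable (Spec_get_enabled_set lines out) := by unfold Spec_get_enabled_set; infer_instance

-- ===== CLAIM (what is proved, stated in full; the proofs are below) =====
def Claim_equal_get_enabled_set : Prop := ∀ (lines : List String), Dom_get_enabled_set lines → Spec_get_enabled_set lines (get_enabled_set lines)

-- ===== LEMMAS AND PROOFS =====

def pvPlain : List String := pvPackagesEnable ++ pvAddIfMissing ++ (pvPackagesDisable ++ pvOptionsDisable)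

set_option maxRecDepth 100000 in
lemma pv_allowed_eq : (pvAllowed : List String) = pvPlain ++ pvPackagesEnable.map pvNotSet := by decide

set_option maxRecDepth 100000 in
lemma pv_plain_no_hash : ∀ x ∈ pvPlain, PySem.Str.startswith x "#" = false := by decide

set_option maxRecDepth 100000 in
lemma pv_comment_hash : ∀ x ∈ pvPackagesEnable.map pvNotSet, PySem.Str.startswith x "#" = true := by decide

lemma pv_foldl_match (f : String → String) (t : String) :
    ∀ (l : List String) (s : PySem.Set String),
    l.foldl (fun s x => if t = f x then PySem.Set.add s (f x) else s) s
      = if t ∈ l.map f then PySem.Set.add s t else s := by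
  intro l
  induction l with
  | nil => intro s; simp
  | cons x l ih =>
    intro s
    by_cases hx : t = f x
    · simp only [List.foldl_cons]
      rw [if_pos hx, ← hx, ih]
      by_cases ht : t ∈ l.map f <;> simp [hx]
    · simp only [List.foldl_cons]
      rw [if_neg hx, ih]
      simp [List.mem_cons, hx]

lemma pv_foldl_match_id (t : String) :
    ∀ (l : List String) (s : PySem.Set String),
    l.foldl (fun s x => if t = x then PySem.Set.add s x else s) s
      = if t ∈ l then PySem.Set.add s t else s := by
  intro l
  induction l with
  | nil => intro s; simp
  | cons x l ih =>
    intro s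
    by_cases hx : t = x
    · simp only [List.foldl_cons]
      rw [if_pos hx, ← hx, ih]
      by_cases ht : t ∈ l <;> simp [hx]
    · simp only [List.foldl_cons]
      rw [if_neg hx, ih]
      simp [List.mem_cons, hx]

lemma pv_if_add_chain (s : PySem.Set String) (t : String) (P Q : Prop) [Decidable P] [Decidable Q] :
    (if Q then PySem.Set.add (if P then PySem.Set.add s t else s) t
     else (if P then PySem.Set.add s t else s))
      = if P ∨ Q then PySem.Set.add s t else s := by
  split_ifs <;> simp_all

lemma pv_stepA_eq (s : PySem.Set String) (line : String) :
    pvStepA s line =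
      (if PySem.Str.strip line ∈ (pvAllowed : List String)
       then PySem.Set.add s (PySem.Str.strip line) else s) := by
  unfold pvStepA
  set t := PySem.Str.strip line with ht
  by_cases hh : PySem.Str.startswith t "#" = true
  · rw [if_pos hh, pv_foldl_match pvNotSet, pv_allowed_eq]
    have hnp : t ∉ pvPlain := by
      intro hm
      rw [pv_plain_no_hash t hm] at hh
      exact Bool.false_ne_true hh
    by_cases hc : t ∈ pvPackagesEnable.map pvNotSet <;>
      simp [hc, List.mem_append, hnp]
  · rw [if_neg hh, pv_foldl_match_id, pv_foldl_match_id, pv_foldl_match_id,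
        pv_if_add_chain, pv_if_add_chain, pv_allowed_eq]
    have hnc : t ∉ pvPackagesEnable.map pvNotSet := fun hm => hh (pv_comment_hash t hm)
    simp only [pvPlain, List.mem_append, hnc, or_false, or_assoc]

lemma pv_filter_add (p : String → Bool) (s : PySem.Set String) (t : String) :
    (PySem.Set.add s t).filter p
      = if p t then PySem.Set.add (s.filter p) t else s.filter p := by
  by_cases hm : t ∈ s <;> by_cases hp : p t = true <;>
    simp_all [PySem.Set.add, List.filter_append, List.mem_filter]

lemma pv_foldl_add_filter (p : String → Bool) :
    ∀ (ts : List String) (s : PySem.Set String),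
    (ts.filter p).foldl PySem.Set.add (s.filter p)
      = (ts.foldl PySem.Set.add s).filter p := by
  intro ts
  induction ts with
  | nil => intro s; simp
  | cons t ts ih =>
    intro s
    rw [List.foldl_cons, ← ih (PySem.Set.add s t), pv_filter_add]
    by_cases hp : p t = true
    · rw [if_pos hp, List.filter_cons, if_pos hp, List.foldl_cons]
    · rw [if_neg hp, List.filter_cons, if_neg hp]

lemma pv_ofList_filter (p : String → Bool) (ts : List String) :
    PySem.Set.ofList (ts.filter p) = (PySem.Set.ofList ts).filter p := by
  have h := pv_foldl_add_filter p ts PySem.Set.empty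
  simpa [PySem.Set.ofList, PySem.Set.empty] using h

lemma pv_gen (A : List String) (ts : List String) :
    ts.foldl (fun s t => if t ∈ A then PySem.Set.add s t else s) PySem.Set.empty
      = PySem.Set.inter (PySem.Set.ofList ts) A := by
  rw [PySem.List.foldl_ite_eq_foldl_filter]
  show PySem.Set.ofList _ = _
  rw [pv_ofList_filter]
  unfold PySem.Set.inter
  congr 1
  funext x
  simp [PySem.Set.contains]

lemma pv_main (lines : List String) :
    get_enabled_set lines = get_enabled_set_alt lines := by
  have hstep : pvStepA = fun s line =>
      if PySem.Str.strip line ∈ (pvAllowed : List String)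
      then PySem.Set.add s (PySem.Str.strip line) else s :=
    funext fun s => funext fun line => pv_stepA_eq s line
  have hmap : lines.foldl (fun s line =>
        if PySem.Str.strip line ∈ (pvAllowed : List String)
        then PySem.Set.add s (PySem.Str.strip line) else s) PySem.Set.empty
      = (lines.map PySem.Str.strip).foldl (fun s t =>
        if t ∈ (pvAllowed : List String) then PySem.Set.add s t else s) PySem.Set.empty :=
    (@List.foldl_map String String (PySem.Set String) PySem.Str.strip
      (fun s t => if t ∈ (pvAllowed : List String) then PySem.Set.add s t else s)
      lines PySem.Set.empty).symm
  unfold get_enabled_set get_enabled_set_alt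
  rw [hstep]
  exact hmap.trans (pv_gen pvAllowed (lines.map PySem.Str.strip))

-- ===== VERDICT (by name: the statement is the Claim_ definition above) =====
theorem get_enabled_set_spec : Claim_equal_get_enabled_set := by
  intro lines _
  unfold Spec_get_enabled_set
  exact pv_main lines
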